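-- pv_equiv track=rewrite | github.com/byzp/of-lyre | tools/key_map_to_midi.py | parse_notation
-- ===== SOURCE A (Python) =====
-- def parse_notation(text):
--     """
--     解析规则：
--     - 按字符逐个扫描
--     - 遇到 '(' 开始收集直到 ')' -> 作为一个事件，内部多字母表示同时发声（和弦）
--     - 遇到字母 A-Z -> 单个字母事件（单音）
--     - 遇到空格 ' ' -> 产生一个休止事件（advance time）
--     - 遇到 '/' -> 小节分隔符，不消耗时间（跳过）
--     返回：事件列表，每项 (tick_index, list_of_letters) 其中 tick_index 为第几个 unit（整数从0起）
--     """
--     events = []  # list of (unit_index, [letters])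
--     unit_idx = 0
--     i = 0
--     skip = 0
--     while i < len(text):
--         ch = text[i]
--         if ch == "#":
--             i += 1
--             skip = 1
--             continue
--         if skip:
--             i += 1
--             if ch == "\t" or ch == "\n" or ch == "\r":
--                 skip = 0
--             continue
--         if ch == "(":
--             # read until closing ')'
--             j = i + 1
--             letters = []
--             while j < len(text) and text[j] != ")":
--                 if text[j].isalpha():
--                     letters.append(text[j].upper())
--                 j += 1
--             # if no closing ) found, treat until end
--             events.append((unit_idx, letters))
--             unit_idx += 1
--             i = j + 1
--         elif ch == "/":
--             # barline: skip, no time advance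
--             i += 1
--         elif ch == " ":  # or ch == '\t' or ch == '\n' or ch == '\r':
--             # whitespace -> one unit rest (advance time)
--             # but avoid multiple consecutive whitespace producing many rest units if user didn't intend?
--             # 根据用户描述，空格就是休止，故每个空白字符当作一个单位的休止。
--             unit_idx += 1
--             i += 1
--         else:
--             # other chars: if letter, it's a single-note event. 其他字符忽略
--             if ch.isalpha():
--                 events.append((unit_idx, [ch.upper()]))
--                 unit_idx += 1
--             # ignore any other char
--             i += 1
--     return events
-- ===== SOURCE B (Python) =====
-- def parse_notation(text):
--     # Pass 1: a flat character-level state machine (mode: 0=normal, 1=comment, 2=group)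
--     # producing a token stream: None = one-unit rest, list of letters = one event.
--     tokens = []
--     mode = 0
--     buf = []
--     for ch in text:
--         if mode == 1:
--             if ch in "\t\n\r":
--                 mode = 0
--         elif mode == 2:
--             if ch == ")":
--                 tokens.append(buf)
--                 buf = []
--                 mode = 0
--             elif ch.isalpha():
--                 buf.append(ch.upper())
--         elif ch == "#":
--             mode = 1
--         elif ch == "(":
--             mode = 2
--         elif ch == " ":
--             tokens.append(None)
--         elif ch.isalpha():
--             tokens.append([ch.upper()])
--     if mode == 2:
--         tokens.append(buf)
--     # Pass 2: assign unit indices (every token occupies one unit).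
--     events = []
--     unit = 0
--     for t in tokens:
--         if t is not None:
--             events.append((unit, t))
--         unit += 1
--     return events
-- ===== Notes on version B (the rewrite author's own statement) =====
-- stated objective: alternative
-- what changed: Replaced A's index-jumping scanner (skip flag, inner while-loop over parenthesized groups with manual index arithmetic) by a two-pass design: a flat character-level state machine (normal/comment/group modes) that emits a token stream, followed by a separate pass assigning unit indices.
import Mathlib
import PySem

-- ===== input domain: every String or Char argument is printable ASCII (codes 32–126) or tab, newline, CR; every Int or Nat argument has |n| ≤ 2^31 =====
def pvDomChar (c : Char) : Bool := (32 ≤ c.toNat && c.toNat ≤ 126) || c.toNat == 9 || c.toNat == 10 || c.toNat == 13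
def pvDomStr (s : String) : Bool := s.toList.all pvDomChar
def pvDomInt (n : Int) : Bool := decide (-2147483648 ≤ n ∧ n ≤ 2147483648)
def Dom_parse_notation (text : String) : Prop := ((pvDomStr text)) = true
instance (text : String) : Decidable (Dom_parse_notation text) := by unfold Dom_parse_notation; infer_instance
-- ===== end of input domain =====

-- B replaces A's index-jumping scanner (skip flag + inner paren loop) by a flat
-- character-level state machine producing a token stream, plus a second pass that
-- assigns unit indices; objective: simpler/alternative decomposition, same values.

-- ===== PORT A =====
-- inner 'while j < len(text) and text[j] != ")"' loop: collects upper-cased letters,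
-- returns them with the remaining characters after the (consumed) ')' (or [] at EOF)
def pvParenA : List Char → List String → (List String × List Char)
  | [], acc => (acc, [])
  | c :: cs, acc =>
    if c = ')' then (acc, cs)
    else pvParenA cs (if PySem.Chars.isalpha c then acc ++ [String.ofList [PySem.Chars.upperChar c]] else acc)

theorem pvParenA_len_le : ∀ (cs : List Char) (acc : List String), (pvParenA cs acc).2.length ≤ cs.length := by
  intro cs
  induction cs with
  | nil => intro acc; simp [pvParenA]
  | cons c cs ih =>
    intro acc
    simp only [pvParenA]
    split
    · simp
    · exact le_trans (ih _) (by simp)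

-- the main 'while i < len(text)' loop of A, with the skip flag as a Bool
def pvLoopA : List Char → Bool → Int → List (Int × List String)
  | [], _, _ => []
  | c :: cs, skip, u =>
    if c = '#' then pvLoopA cs true u
    else if skip then
      (if c = '\t' ∨ c = '\n' ∨ c = '\r' then pvLoopA cs false u else pvLoopA cs true u)
    else if c = '(' then
      (u, (pvParenA cs []).1) :: pvLoopA (pvParenA cs []).2 false (u + 1)
    else if c = '/' then pvLoopA cs false u
    else if c = ' ' then pvLoopA cs false (u + 1)
    else if PySem.Chars.isalpha c then (u, [String.ofList [PySem.Chars.upperChar c]]) :: pvLoopA cs false (u + 1)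
    else pvLoopA cs false u
termination_by cs => cs.length
decreasing_by all_goals simp_all <;> exact pvParenA_len_le cs []

def parse_notation (text : String) : List (Int × List String) :=
  pvLoopA text.toList false 0

-- ===== PORT B =====
-- pass 1: state machine over the characters; mode 0 = normal, 1 = comment, 2 = group;
-- token none = one-unit rest, token (some letters) = one event
def pvTokB : List Char → Nat → List String → List (Option (List String))
  | [], mode, buf => if mode = 2 then [some buf] else []
  | c :: cs, mode, buf =>
    if mode = 1 then
      (if c = '\t' ∨ c = '\n' ∨ c = '\r' then pvTokB cs 0 buf else pvTokB cs 1 buf)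
    else if mode = 2 then
      (if c = ')' then some buf :: pvTokB cs 0 []
       else if PySem.Chars.isalpha c then pvTokB cs 2 (buf ++ [String.ofList [PySem.Chars.upperChar c]])
       else pvTokB cs 2 buf)
    else if c = '#' then pvTokB cs 1 buf
    else if c = '(' then pvTokB cs 2 buf
    else if c = ' ' then none :: pvTokB cs 0 buf
    else if PySem.Chars.isalpha c then some [String.ofList [PySem.Chars.upperChar c]] :: pvTokB cs 0 buf
    else pvTokB cs 0 buf

-- pass 2: assign unit indices
def pvAssignB : List (Option (List String)) → Int → List (Int × List String)
  | [], _ => []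
  | none :: ts, u => pvAssignB ts (u + 1)
  | some t :: ts, u => (u, t) :: pvAssignB ts (u + 1)

def parse_notation_alt (text : String) : List (Int × List String) :=
  pvAssignB (pvTokB text.toList 0 []) 0

-- ===== PRECONDITION & SPEC =====
def Spec_parse_notation (text : String) (out : List (Int × List String)) : Prop := out = parse_notation_alt text
instance (text : String) (out : List (Int × List String)) : Decidable (Spec_parse_notation text out) := by unfold Spec_parse_notation; infer_instance

-- ===== CLAIM (what is proved, stated in full; the proofs are below) =====
def Claim_equal_parse_notation : Prop := ∀ (text : String), Dom_parse_notation text → Spec_parse_notation text (parse_notation text)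

-- ===== LEMMAS AND PROOFS =====
-- simultaneous invariant: A's scanner in normal / skip / inside-paren state equals
-- B's tokenizer in mode 0 / 1 / 2 followed by the index-assignment pass
theorem pv_key : ∀ (n : Nat) (cs : List Char), cs.length ≤ n → ∀ (u : Int) (buf : List String),
    (pvLoopA cs false u = pvAssignB (pvTokB cs 0 []) u) ∧
    (pvLoopA cs true u = pvAssignB (pvTokB cs 1 []) u) ∧
    ((u, (pvParenA cs buf).1) :: pvLoopA (pvParenA cs buf).2 false (u + 1)
       = pvAssignB (pvTokB cs 2 buf) u) := by
  intro n
  induction n with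
  | zero =>
    intro cs h u buf
    have : cs = [] := List.length_eq_zero_iff.mp (Nat.le_zero.mp h)
    subst this
    refine ⟨by simp [pvLoopA, pvTokB, pvAssignB], by simp [pvLoopA, pvTokB, pvAssignB], ?_⟩
    simp [pvParenA, pvTokB, pvAssignB, pvLoopA]
  | succ n ih =>
    intro cs h u buf
    cases cs with
    | nil => exact ⟨by simp [pvLoopA, pvTokB, pvAssignB], by simp [pvLoopA, pvTokB, pvAssignB], by simp [pvParenA, pvTokB, pvAssignB, pvLoopA]⟩
    | cons c cs =>
      have hlen : cs.length ≤ n := by simpa using h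
      refine ⟨?_, ?_, ?_⟩
      · -- mode 0 / skip = false
        by_cases h1 : c = '#'
        · simp [pvLoopA, pvTokB, h1, (ih cs hlen u []).2.1]
        · by_cases h2 : c = '('
          · have h3 : pvTokB (c :: cs) 0 [] = pvTokB cs 2 [] := by
              simp [pvTokB, h2]
            rw [h3, ← (ih cs hlen u []).2.2]
            simp [pvLoopA, h2]
          · by_cases h4 : c = '/'
            · simp [pvLoopA, pvTokB, h4, (by decide : PySem.Chars.isalpha '/' = false), (ih cs hlen u []).1]
            · by_cases h5 : c = ' '
              · simp [pvLoopA, pvTokB, pvAssignB, h5, (ih cs hlen (u+1) []).1]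
              · by_cases h6 : PySem.Chars.isalpha c
                · simp [pvLoopA, pvTokB, pvAssignB, h1, h2, h4, h5, h6, (ih cs hlen (u+1) []).1]
                · simp [pvLoopA, pvTokB, h1, h2, h4, h5, h6, (ih cs hlen u []).1]
      · -- skip = true / mode 1
        by_cases h1 : c = '#'
        · subst h1
          simp [pvLoopA, pvTokB, (ih cs hlen u []).2.1]
        · by_cases h2 : c = '\t' ∨ c = '\n' ∨ c = '\r'
          · simp [pvLoopA, pvTokB, h1, h2, (ih cs hlen u []).1]
          · simp [pvLoopA, pvTokB, h1, h2, (ih cs hlen u []).2.1]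
      · -- inside parens / mode 2
        by_cases h1 : c = ')'
        · simp [pvParenA, pvTokB, pvAssignB, h1, (ih cs hlen (u+1) []).1]
        · by_cases h2 : PySem.Chars.isalpha c
          · simp only [pvParenA, pvTokB, if_neg h1, if_pos h2]
            have := (ih cs hlen u (buf ++ [String.ofList [PySem.Chars.upperChar c]])).2.2
            simpa using this
          · simp only [pvParenA, pvTokB, if_neg h1, if_neg h2]
            have := (ih cs hlen u buf).2.2
            simpa using this

-- ===== VERDICT (by name: the statement is the Claim_ definition above) =====
theorem parse_notation_spec : Claim_equal_parse_notation := by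
  intro text _
  unfold Spec_parse_notation parse_notation parse_notation_alt
  exact (pv_key text.toList.length text.toList le_rfl 0 []).1
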